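-- pv_equiv track=rewrite | github.com/YangXu-0/CIV102-Bridge-Calculator | civBridgeCase2.py | shear_forces_dense
-- ===== SOURCE A (Python) =====
-- def shear_forces_dense(forces):
--     ''' Takes in a dictionary of shear forces {location: force} and calculates the shear force every mm '''
--     copy = {-1: 0}   # temp case
--     temp = list(forces.keys())   # making a list to loop through the keys
--     for i in range(0, 1280+1):
--         if i in forces.keys():   # check if each mm increment has a force applied
--             copy[i] = copy[i-1] + forces[i]    # adds new force to previous shear forces
--         else:
--             copy[i] = copy[i-1]   # otherwise just copy the old one (shear force doesn't change)
--
--     del copy[-1]   # deleting temp case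
--
--     return copy
-- ===== SOURCE B (Python) =====
-- def shear_forces_dense(forces):
--     ''' Takes in a dictionary of shear forces {location: force} and calculates the shear force every mm '''
--     # Event-based: sort the force locations inside the range, then fill each
--     # constant segment between consecutive events with the current total.
--     events = sorted(k for k in forces if 0 <= k <= 1280)
--     out = {}
--     total = 0
--     prev = 0
--     for k in events:
--         for i in range(prev, k):
--             out[i] = total
--         total += forces[k]
--         prev = k
--     for i in range(prev, 1281):
--         out[i] = total
--     return out
-- ===== Notes on version B (the rewrite author's own statement) =====
-- stated objective: alternative
-- what changed: Replaces A's per-millimetre loop (1281 membership tests against the dict, each value read back from the growing result via a -1 sentinel that is deleted at the end) by an event-based sweep: sort the force locations that lie in [0,1280], then fill each constant segment between consecutive events with the running total, adding each force only when its event is reached.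
import Mathlib
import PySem

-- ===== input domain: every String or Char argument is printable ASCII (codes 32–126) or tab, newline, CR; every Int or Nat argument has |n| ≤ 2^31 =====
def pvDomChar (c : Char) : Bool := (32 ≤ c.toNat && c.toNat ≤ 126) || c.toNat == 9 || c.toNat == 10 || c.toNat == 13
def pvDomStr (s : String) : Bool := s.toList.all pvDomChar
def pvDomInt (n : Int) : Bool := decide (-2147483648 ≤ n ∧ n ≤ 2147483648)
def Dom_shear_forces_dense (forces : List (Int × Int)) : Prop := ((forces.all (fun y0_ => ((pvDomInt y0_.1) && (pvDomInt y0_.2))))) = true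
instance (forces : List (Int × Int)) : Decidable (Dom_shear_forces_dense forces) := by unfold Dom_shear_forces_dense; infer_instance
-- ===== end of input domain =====

-- B replaces A's per-millimetre loop (a membership test and a read-back from the growing
-- result dict with a -1 sentinel) by an event-based sweep: sort the force locations in
-- [0,1280] and fill each constant segment between consecutive events with the running total.

-- ===== PORT A =====
def shear_forces_dense (forces : List (Int × Int)) : List (Int × Int) :=
  let fd := PySem.Dict.ofList forces
  let copy0 : PySem.Dict Int Int := PySem.Dict.ofList [(-1, 0)]   -- copy = {-1: 0}
  let _temp := fd.keys                                            -- temp = list(forces.keys()) (unused in A)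
  let copy := (PySem.List.pyRange 0 1281 1).foldl
    (fun (c : PySem.Dict Int Int) i =>
      if fd.contains i then c.insert i (c.getD (i - 1) 0 + fd.getD i 0)
      else c.insert i (c.getD (i - 1) 0)) copy0
  (copy.erase (-1)).items                                         -- del copy[-1]; return copy

-- ===== PORT B =====
/-- the inner fill loop `for i in range(lo, hi): out[i] = total` -/
def sfdFill (out : PySem.Dict Int Int) (total lo hi : Int) : PySem.Dict Int Int :=
  (PySem.List.pyRange lo hi 1).foldl (fun o i => o.insert i total) out

/-- one iteration of the outer loop over the sorted events; state = (out, total, prev).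
    `forces[k]` is ported as `getD k 0`: every event k is a key of fd, so this is exact. -/
def sfdStep (fd : PySem.Dict Int Int) (st : PySem.Dict Int Int × Int × Int) (k : Int) :
    PySem.Dict Int Int × Int × Int :=
  (sfdFill st.1 st.2.1 st.2.2 k, st.2.1 + fd.getD k 0, k)

def shear_forces_dense_alt (forces : List (Int × Int)) : List (Int × Int) :=
  let fd := PySem.Dict.ofList forces
  let events := PySem.List.sorted
    (fd.keys.filter (fun k => decide (0 ≤ k) && decide (k ≤ 1280))) (fun x => x) false
  let st := events.foldl (sfdStep fd) (PySem.Dict.empty, 0, 0)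
  (sfdFill st.1 st.2.1 st.2.2 1281).items

-- ===== PRECONDITION & SPEC =====
def Spec_shear_forces_dense (forces : List (Int × Int)) (out : List (Int × Int)) : Prop := out = shear_forces_dense_alt forces
instance (forces : List (Int × Int)) (out : List (Int × Int)) : Decidable (Spec_shear_forces_dense forces out) := by unfold Spec_shear_forces_dense; infer_instance

-- ===== CLAIM (what is proved, stated in full; the proofs are below) =====
def Claim_equal_shear_forces_dense : Prop := ∀ (forces : List (Int × Int)), Dom_shear_forces_dense forces → Spec_shear_forces_dense forces (shear_forces_dense forces)

-- ===== LEMMAS AND PROOFS =====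

/-- Prefix sum of the per-index increments `f 0, …, f (n-1)`. -/
def pvS (f : Nat → Int) (n : Nat) : Int := ((List.range n).map f).sum

/-- The table both programs ultimately produce: key k ↦ prefix sum through index k. -/
def pvR (f : Nat → Int) (n : Nat) : List (Int × Int) :=
  (List.range n).map (fun (k : Nat) => ((k : Int), pvS f (k + 1)))

theorem pvS_succ (f : Nat → Int) (n : Nat) : pvS f (n + 1) = pvS f n + f n := by
  simp [pvS, List.range_succ]

theorem pvS_eq_of_zero (f : Nat → Int) (a b : Nat) (hab : a ≤ b)
    (h0 : ∀ j, a ≤ j → j < b → f j = 0) : pvS f b = pvS f a := by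
  induction b, hab using Nat.le_induction with
  | base => rfl
  | succ m hm ih =>
    rw [pvS_succ, h0 m hm (Nat.lt_succ_self m), add_zero]
    exact ih (fun j hj hj' => h0 j hj (Nat.lt_succ_of_lt hj'))

theorem pvR_succ (f : Nat → Int) (n : Nat) :
    pvR f (n + 1) = pvR f n ++ [((n : Int), pvS f (n + 1))] := by
  simp [pvR, List.range_succ]

theorem pvR_keys (f : Nat → Int) (n : Nat) :
    (pvR f n).map (·.1) = (List.range n).map (fun (k : Nat) => (k : Int)) := by
  simp only [pvR, List.map_map]
  rfl

theorem pvR_nodup_cons_keys (f : Nat → Int) (n : Nat) :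
    (((-1 : Int), (0 : Int)) :: pvR f n).map (·.1) |>.Nodup := by
  simp only [List.map_cons, pvR_keys]
  refine List.nodup_cons.mpr ⟨?_, ?_⟩
  · simp
  · exact List.Nodup.map (fun a b h => by exact_mod_cast h) List.nodup_range

theorem pvR_not_mem_key (f : Nat → Int) (n : Nat) :
    (n : Int) ∉ (((-1 : Int), (0 : Int)) :: pvR f n).map (·.1) := by
  simp only [List.map_cons, pvR_keys, List.mem_cons, List.mem_map, List.mem_range]
  rintro (h | ⟨k, hk, h⟩)
  · simp at h
  · have : k = n := by exact_mod_cast h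
    omega

/-- Lookup of the previously written key in the invariant dict gives the running sum. -/
theorem pv_getD_prev (f : Nat → Int) (n : Nat) :
    (PySem.Dict.mk (((-1 : Int), (0 : Int)) :: pvR f n)).getD ((n : Int) - 1) 0 = pvS f n := by
  have hnd : (PySem.Dict.mk (((-1 : Int), (0 : Int)) :: pvR f n)).keys.Nodup := by
    simpa [PySem.Dict.keys] using pvR_nodup_cons_keys f n
  cases n with
  | zero =>
    rw [show ((0 : Nat) : Int) - 1 = -1 by simp]
    have := PySem.Dict.getD_of_mem_items
      (PySem.Dict.mk (((-1 : Int), (0 : Int)) :: pvR f 0))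
      (List.mem_cons_self) hnd 0
    simpa [pvS] using this
  | succ m =>
    have hmem : (((m : Int)), pvS f (m + 1)) ∈
        (PySem.Dict.mk (((-1 : Int), (0 : Int)) :: pvR f (m + 1))).items := by
      show _ ∈ ((-1 : Int), (0 : Int)) :: pvR f (m + 1)
      refine List.mem_cons_of_mem _ ?_
      exact List.mem_map.mpr ⟨m, by simp, rfl⟩
    have := PySem.Dict.getD_of_mem_items _ hmem hnd 0
    rw [show ((m + 1 : Nat) : Int) - 1 = (m : Int) by push_cast; ring]
    exact this

/-- The fresh key `n` is not yet in the invariant dict. -/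
theorem pv_not_contains (f : Nat → Int) (n : Nat) :
    (PySem.Dict.mk (((-1 : Int), (0 : Int)) :: pvR f n)).contains (n : Int) = false := by
  by_contra h
  have : ((n : Int)) ∈ (PySem.Dict.mk (((-1 : Int), (0 : Int)) :: pvR f n)).keys :=
    (PySem.Dict.contains_iff_mem_keys _ _).mp (by simpa using Bool.of_not_eq_false h)
  exact pvR_not_mem_key f n (by simpa [PySem.Dict.keys] using this)

/-- A's loop invariant: after n iterations the dict is the sentinel plus the table pvR. -/
theorem pvA_fold (fd : PySem.Dict Int Int) (n : Nat) :
    (PySem.List.pyRange 0 (n : Int) 1).foldl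
      (fun (c : PySem.Dict Int Int) i =>
        if fd.contains i then c.insert i (c.getD (i - 1) 0 + fd.getD i 0)
        else c.insert i (c.getD (i - 1) 0))
      (PySem.Dict.ofList [(-1, 0)])
    = PySem.Dict.mk (((-1 : Int), (0 : Int)) :: pvR (fun k => fd.getD (k : Int) 0) n) := by
  induction n with
  | zero => rfl
  | succ m ih =>
    set f : Nat → Int := fun k => fd.getD (k : Int) 0 with hf
    have hsplit : PySem.List.pyRange 0 ((m : Int) + 1) 1
        = PySem.List.pyRange 0 (m : Int) 1 ++ [(m : Int)] :=
      PySem.List.pyRange_one_succ_right (by positivity)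
    rw [show ((m + 1 : Nat) : Int) = (m : Int) + 1 by push_cast; ring, hsplit,
        List.foldl_append, ih]
    set c := PySem.Dict.mk (((-1 : Int), (0 : Int)) :: pvR f m) with hc
    have hprev : c.getD ((m : Int) - 1) 0 = pvS f m := pv_getD_prev f m
    have hnc : c.contains (m : Int) = false := pv_not_contains f m
    have hval : (if fd.contains (m : Int) then c.insert (m : Int) (c.getD ((m : Int) - 1) 0 + fd.getD (m : Int) 0)
        else c.insert (m : Int) (c.getD ((m : Int) - 1) 0))
        = c.insert (m : Int) (pvS f (m + 1)) := by
      by_cases h : fd.contains (m : Int) = true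
      · rw [if_pos h, hprev, pvS_succ]
      · rw [if_neg h, hprev]
        have : fd.getD (m : Int) 0 = 0 :=
          PySem.Dict.getD_of_not_contains fd 0 (Bool.not_eq_true _ ▸ h)
        rw [pvS_succ, hf]
        simp [this]
    rw [List.foldl_cons, List.foldl_nil, hval]
    apply PySem.Dict.ext
    rw [PySem.Dict.items_insert_of_not_contains c _ hnc]
    simp [hc, pvR_succ]

/-- Deleting the sentinel leaves exactly the table. -/
theorem pv_erase_sentinel (f : Nat → Int) (n : Nat) :
    ((PySem.Dict.mk (((-1 : Int), (0 : Int)) :: pvR f n)).erase (-1)).items = pvR f n := by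
  simp only [PySem.Dict.erase]
  show List.filter _ (((-1 : Int), (0 : Int)) :: pvR f n) = pvR f n
  rw [List.filter_cons_of_neg (by decide)]
  apply List.filter_eq_self.mpr
  intro p hp
  obtain ⟨k, -, rfl⟩ := List.mem_map.mp hp
  simp only [Bool.not_eq_eq_eq_not, Bool.not_true, beq_eq_false_iff_ne, ne_eq]
  intro h
  have h0 : (0 : Int) ≤ (k : Int) := Int.natCast_nonneg k
  omega

-- ===== B-side lemmas =====

/-- A dict whose items are the table through p contains no key ≥ p. -/
theorem pv_table_not_contains (f : Nat → Int) (p : Nat) (out : PySem.Dict Int Int)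
    (hout : out.items = pvR f p) (i : Int) (hi : (p : Int) ≤ i) :
    out.contains i = false := by
  by_contra h
  have hmem : i ∈ out.keys := (PySem.Dict.contains_iff_mem_keys _ _).mp (Bool.of_not_eq_false h)
  have : i ∈ (List.range p).map (fun (k : Nat) => (k : Int)) := by
    rw [← pvR_keys f p, ← hout]
    simpa [PySem.Dict.keys] using hmem
  obtain ⟨k, hk, rfl⟩ := List.mem_map.mp this
  have := List.mem_range.mp hk
  omega

/-- Filling [p, q) with the (correct) constant extends the table from p to q. -/
theorem pvFill_items (f : Nat → Int) (out : PySem.Dict Int Int) (t : Int) (p q : Nat)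
    (hpq : p ≤ q) (hout : out.items = pvR f p)
    (hv : ∀ i : Nat, p ≤ i → i < q → t = pvS f (i + 1)) :
    (sfdFill out t (p : Int) (q : Int)).items = pvR f q := by
  unfold sfdFill
  induction q, hpq using Nat.le_induction with
  | base => rw [PySem.List.pyRange_one_eq_nil (le_refl _), List.foldl_nil, hout]
  | succ q hpq ih =>
    have hsplit : PySem.List.pyRange (p : Int) ((q + 1 : Nat) : Int) 1
        = PySem.List.pyRange (p : Int) (q : Int) 1 ++ [(q : Int)] := by
      rw [show ((q + 1 : Nat) : Int) = (q : Int) + 1 by push_cast; ring]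
      exact PySem.List.pyRange_one_succ_right (by exact_mod_cast hpq)
    rw [hsplit, List.foldl_append, List.foldl_cons, List.foldl_nil]
    have hmid : (List.foldl (fun o i => o.insert i t)
        out (PySem.List.pyRange (p : Int) (q : Int) 1)).items = pvR f q :=
      ih (fun i hi hi' => hv i hi (by omega))
    rw [PySem.Dict.items_insert_of_not_contains _ _
      (pv_table_not_contains f q _ hmid (q : Int) (le_refl _)), hmid,
      hv q hpq (by omega), pvR_succ]

/-- B's outer loop invariant, followed by the final fill: the result is the full table.
    `q` is the first index the running total is valid for (p at the start, prev+1 after a step). -/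
theorem pvB_loop (fd : PySem.Dict Int Int) (es : List Int) (p q : Nat) (total : Int)
    (out : PySem.Dict Int Int) (hp : p ≤ 1281)
    (hout : out.items = pvR (fun k => fd.getD (k : Int) 0) p)
    (hsorted : es.Pairwise (· < ·))
    (hbd : ∀ e ∈ es, (p : Int) ≤ e ∧ e ≤ 1280)
    (hcov : ∀ j : Nat, j ≤ 1280 → fd.getD (j : Int) 0 ≠ 0 → (j : Int) ≤ (p : Int) ∨ (j : Int) ∈ es)
    (hq1 : q ≤ p + 1) (hq2 : ∀ e ∈ es, (q : Int) ≤ e)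
    (htot : ∀ m : Nat, q ≤ m → m ≤ 1281 → (∀ e ∈ es, (m : Int) ≤ e) →
      total = pvS (fun k => fd.getD (k : Int) 0) m) :
    (sfdFill (es.foldl (sfdStep fd) (out, total, (p : Int))).1
        (es.foldl (sfdStep fd) (out, total, (p : Int))).2.1
        (es.foldl (sfdStep fd) (out, total, (p : Int))).2.2 1281).items
      = pvR (fun k => fd.getD (k : Int) 0) 1281 := by
  set f : Nat → Int := fun k => fd.getD (k : Int) 0 with hf
  induction es generalizing p q total out with
  | nil =>
    simp only [List.foldl_nil]
    rw [show (1281 : Int) = ((1281 : Nat) : Int) by norm_num]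
    exact pvFill_items f out total p 1281 hp hout
      (fun i hi hi' => htot (i + 1) (by omega) (by omega) (by simp))
  | cons k es' ih =>
    obtain ⟨hpk, hk1280⟩ := hbd k (List.mem_cons_self)
    have hqk : (q : Int) ≤ k := hq2 k (List.mem_cons_self)
    have hk0 : 0 ≤ k := le_trans (Int.natCast_nonneg p) hpk
    set kn : Nat := k.toNat with hkn
    have hkcast : (kn : Int) = k := Int.toNat_of_nonneg hk0
    have hpkn : p ≤ kn := by omega
    have hlt : ∀ e ∈ es', k < e := fun e he => (List.pairwise_cons.mp hsorted).1 e he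
    -- the fill in this step is correct
    have hfill : (sfdFill out total (p : Int) k).items = pvR f kn := by
      rw [← hkcast]
      refine pvFill_items f out total p kn hpkn hout ?_
      intro i hi hi'
      refine htot (i + 1) (by omega) (by omega) ?_
      intro e he
      rcases List.mem_cons.mp he with rfl | he'
      · omega
      · have := hlt e he'; omega
    -- the new total is correct for every index up to the next event
    have htot' : ∀ m : Nat, kn + 1 ≤ m → m ≤ 1281 → (∀ e ∈ es', (m : Int) ≤ e) →
        total + fd.getD k 0 = pvS f m := by
      intro m hm hm' hme
      have h1 : pvS f m = pvS f (kn + 1) := by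
        refine pvS_eq_of_zero f (kn + 1) m (by omega) ?_
        intro j hj hj'
        by_contra hne
        rcases hcov j (by omega) hne with hle | hmem
        · omega
        · rcases List.mem_cons.mp hmem with hjk | hj''
          · omega
          · have := hlt _ hj''
            have := hme _ hj''
            omega
      have h2 : total = pvS f kn := by
        refine htot kn (by omega) (by omega) ?_
        intro e he
        rcases List.mem_cons.mp he with rfl | he'
        · omega
        · have := hlt e he'; omega
      rw [h1, pvS_succ, ← h2, hf]
      simp [hkcast]
    have hbd' : ∀ e ∈ es', ((kn : Nat) : Int) ≤ e ∧ e ≤ 1280 := fun e he =>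
      ⟨by rw [hkcast]; exact le_of_lt (hlt e he), (hbd e (List.mem_cons_of_mem _ he)).2⟩
    have hcov' : ∀ j : Nat, j ≤ 1280 → fd.getD (j : Int) 0 ≠ 0 →
        (j : Int) ≤ ((kn : Nat) : Int) ∨ (j : Int) ∈ es' := by
      intro j hj hne
      rcases hcov j hj hne with hle | hmem
      · left; omega
      · rcases List.mem_cons.mp hmem with hjk | hj''
        · left; omega
        · right; exact hj''
    have hq2' : ∀ e ∈ es', ((kn + 1 : Nat) : Int) ≤ e := by
      intro e he
      have := hlt e he; push_cast; omega
    have := ih (p := kn) (q := kn + 1) (total := total + fd.getD k 0)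
      (out := sfdFill out total (p : Int) k) (by omega)
      (List.pairwise_cons.mp hsorted).2 hbd' hcov' (by omega) hq2' hfill htot'
    simpa only [List.foldl_cons, sfdStep, hkcast] using this

/-- Pairwise ≤ and Nodup give Pairwise < on Ints. -/
theorem pv_pairwise_lt_of_le_nodup (l : List Int)
    (hle : l.Pairwise (· ≤ ·)) (hnd : l.Nodup) : l.Pairwise (· < ·) :=
  (hle.and hnd).imp (fun h => lt_of_le_of_ne h.1 h.2)

-- ===== VERDICT (by name: the statement is the Claim_ definition above) =====
set_option maxRecDepth 4096 in
theorem shear_forces_dense_spec : Claim_equal_shear_forces_dense := by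
  intro forces _
  unfold Spec_shear_forces_dense shear_forces_dense shear_forces_dense_alt
  dsimp only
  set fd := PySem.Dict.ofList forces with hfd
  set f : Nat → Int := fun k => fd.getD (k : Int) 0 with hf
  -- A's side reduces to the table
  have hn : (1281 : Int) = ((1281 : Nat) : Int) := by norm_num
  rw [hn, pvA_fold fd 1281, pv_erase_sentinel f 1281]
  -- B's side: facts about the sorted event list
  set evs := fd.keys.filter (fun k => decide (0 ≤ k) && decide (k ≤ 1280)) with hevs
  set events := PySem.List.sorted evs (fun x => x) false with hevents
  have hperm : events.Perm evs := PySem.List.sorted_perm evs (fun x => x) false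
  have hndkeys : fd.keys.Nodup := PySem.Dict.nodup_keys_ofList forces
  have hnd : events.Nodup := hperm.nodup_iff.mpr (hndkeys.filter _)
  have hsorted : events.Pairwise (· < ·) :=
    pv_pairwise_lt_of_le_nodup events (PySem.List.sorted_pairwise evs (fun x => x)) hnd
  have hmem : ∀ e : Int, e ∈ events ↔ (e ∈ fd.keys ∧ 0 ≤ e ∧ e ≤ 1280) := by
    intro e
    rw [hevents, PySem.List.mem_sorted, hevs, List.mem_filter]
    simp
  have hbd : ∀ e ∈ events, ((0 : Nat) : Int) ≤ e ∧ e ≤ 1280 := by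
    intro e he
    have := (hmem e).mp he
    exact ⟨by exact_mod_cast this.2.1, this.2.2⟩
  have hcov0 : ∀ j : Nat, j ≤ 1280 → f j ≠ 0 → (j : Int) ∈ events := by
    intro j hj hne
    have hcont : fd.contains (j : Int) = true := by
      by_contra h
      exact hne (PySem.Dict.getD_of_not_contains fd 0 (Bool.not_eq_true _ ▸ h))
    refine (hmem _).mpr ⟨(PySem.Dict.contains_iff_mem_keys _ _).mp hcont, by positivity, by exact_mod_cast hj⟩
  have hcov : ∀ j : Nat, j ≤ 1280 → f j ≠ 0 → (j : Int) ≤ ((0 : Nat) : Int) ∨ (j : Int) ∈ events :=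
    fun j hj hne => Or.inr (hcov0 j hj hne)
  have htot : ∀ m : Nat, 0 ≤ m → m ≤ 1281 → (∀ e ∈ events, (m : Int) ≤ e) → (0 : Int) = pvS f m := by
    intro m _ hm hme
    rw [show (0 : Int) = pvS f 0 from rfl]
    refine (pvS_eq_of_zero f 0 m (Nat.zero_le m) ?_).symm
    intro j _ hj
    by_contra hne
    have hmemj := hcov0 j (by omega) hne
    have := hme _ hmemj
    omega
  have hB := pvB_loop fd events 0 0 0 PySem.Dict.empty (by omega) (by rfl)
    hsorted hbd hcov (by omega) (fun e he => by exact_mod_cast (hbd e he).1) htot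
  rw [show ((0 : Nat) : Int) = (0 : Int) by norm_num] at hB
  exact hB.symm
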